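-- pv_equiv track=rewrite | github.com/himanshuchoudhary247/GitManagementAiAgent | detailed/utils/code_utils.py | find_function_definitions
-- ===== SOURCE A (Python) =====
-- def find_function_definitions(content, function_name):
--     """
--     Finds the start and end line numbers of a function definition in the given content.
--     Returns a tuple (start_line, end_line). If not found, returns (None, None).
--     """
--     lines = content.split('\n')
--     start_line = None
--     end_line = None
--     for i, line in enumerate(lines):
--         if line.strip().startswith(f"def {function_name}("):
--             start_line = i
--             # Find the end of the function by looking for the next function or end of file
--             for j in range(i + 1, len(lines)):
--                 if lines[j].strip().startswith("def "):
--                     end_line = j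
--                     break
--             if end_line is None:
--                 end_line = len(lines)
--             break
--     return start_line, end_line
-- ===== SOURCE B (Python) =====
-- def find_function_definitions(content, function_name):
--     """
--     Finds the start and end line numbers of a function definition in the given content.
--     Returns a tuple (start_line, end_line). If not found, returns (None, None).
--     """
--     lines = content.split('\n')
--     # one pass: table of all lines whose stripped text starts with "def "
--     def_indices = [i for i, line in enumerate(lines) if line.strip().startswith("def ")]
--     target = "def " + function_name + "("
--     for pos, i in enumerate(def_indices):
--         if lines[i].strip().startswith(target):
--             end = def_indices[pos + 1] if pos + 1 < len(def_indices) else len(lines)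
--             return i, end
--     return None, None
-- ===== Notes on version B (the rewrite author's own statement) =====
-- stated objective: alternative
-- what changed: B builds a one-pass index table of all 'def ' line numbers and answers both the start and the end line by looking up the matching entry and its successor in that table, instead of A's nested forward re-scan of the lines for the next def.
import Mathlib
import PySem

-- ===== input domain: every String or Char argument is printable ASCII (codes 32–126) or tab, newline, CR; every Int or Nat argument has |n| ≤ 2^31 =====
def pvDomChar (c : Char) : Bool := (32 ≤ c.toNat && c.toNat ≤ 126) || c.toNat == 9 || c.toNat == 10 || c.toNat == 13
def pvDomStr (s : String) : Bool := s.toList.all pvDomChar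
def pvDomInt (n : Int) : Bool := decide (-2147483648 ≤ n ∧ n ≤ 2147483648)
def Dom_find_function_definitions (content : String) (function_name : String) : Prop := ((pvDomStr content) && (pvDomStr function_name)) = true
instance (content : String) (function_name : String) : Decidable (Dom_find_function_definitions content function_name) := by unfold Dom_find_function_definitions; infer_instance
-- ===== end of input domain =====

-- B replaces A's nested forward re-scan for the next def by a single precomputed table of
-- def-line indices, reading the end line from the table's next entry (alternative decomposition,
-- same return value).

-- ===== PORT A =====
-- inner loop: for j in range(i+1, len(lines)): if lines[j].strip().startswith("def "): end_line = j; break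
def ffdInnerA (lines : List String) : List Int → Option Int
  | [] => none
  | j :: rest =>
    if PySem.Str.startswith (PySem.Str.strip (PySem.List.pyGetD lines j "")) "def " then some j
    else ffdInnerA lines rest

-- outer loop: for i, line in enumerate(lines): … (end_line: the inner scan's result, or len(lines) if it found none)
def ffdOuterA (lines : List String) (tgt : String) : List (Int × String) → Option Int × Option Int
  | [] => (none, none)
  | (i, line) :: rest =>
    if PySem.Str.startswith (PySem.Str.strip line) tgt then
      (some i, some ((ffdInnerA lines (PySem.List.pyRange (i + 1) (lines.length : Int) 1)).getD (lines.length : Int)))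
    else ffdOuterA lines tgt rest

def find_function_definitions (content : String) (function_name : String) : Option Int × Option Int :=
  let lines := (PySem.Str.split? content "\n").getD []
  ffdOuterA lines ("def " ++ function_name ++ "(") (PySem.List.enumerate lines 0)

-- ===== PORT B =====
-- for pos, i in enumerate(def_indices): …; end = def_indices[pos+1] if pos+1 < len(def_indices) else len(lines)
def ffdGoB (lines : List String) (tgt : String) : List Int → Option Int × Option Int
  | [] => (none, none)
  | i :: rest =>
    if PySem.Str.startswith (PySem.Str.strip (PySem.List.pyGetD lines i "")) tgt then
      (some i, some (match rest with | [] => (lines.length : Int) | k :: _ => k))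
    else ffdGoB lines tgt rest

def find_function_definitions_alt (content : String) (function_name : String) : Option Int × Option Int :=
  let lines := (PySem.Str.split? content "\n").getD []
  let defIndices := ((PySem.List.enumerate lines 0).filter
      (fun p => PySem.Str.startswith (PySem.Str.strip p.2) "def ")).map Prod.fst
  ffdGoB lines ("def " ++ function_name ++ "(") defIndices

-- ===== PRECONDITION & SPEC =====
def Spec_find_function_definitions (content : String) (function_name : String) (out : Option Int × Option Int) : Prop := out = find_function_definitions_alt content function_name
instance (content : String) (function_name : String) (out : Option Int × Option Int) : Decidable (Spec_find_function_definitions content function_name out) := by unfold Spec_find_function_definitions; infer_instance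

-- ===== CLAIM (what is proved, stated in full; the proofs are below) =====
def Claim_equal_find_function_definitions : Prop := ∀ (content : String) (function_name : String), Dom_find_function_definitions content function_name → Spec_find_function_definitions content function_name (find_function_definitions content function_name)

-- ===== LEMMAS AND PROOFS =====

theorem ffd_pyGetD_append {pre : List String} {l : String} {rest : List String} :
    PySem.List.pyGetD (pre ++ l :: rest) (pre.length : Int) "" = l := by
  rw [PySem.List.pyGetD_natCast]
  simp [List.getD]

-- the target prefix "def {name}(" itself starts with "def "
theorem ffd_tgt_isDef (name s : String)
    (h : PySem.Str.startswith (PySem.Str.strip s) ("def " ++ name ++ "(") = true) :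
    PySem.Str.startswith (PySem.Str.strip s) "def " = true := by
  rw [PySem.Str.startswith_eq] at h ⊢
  rw [PySem.Chars.startswith_iff] at h ⊢
  refine List.IsPrefix.trans ?_ h
  simp [String.toList_append]

theorem ffdGoB_cons (lines : List String) (tgt : String) (i : Int) (rest : List Int) :
    ffdGoB lines tgt (i :: rest)
      = if PySem.Str.startswith (PySem.Str.strip (PySem.List.pyGetD lines i "")) tgt then
          (some i, some (match rest with | [] => (lines.length : Int) | k :: _ => k))
        else ffdGoB lines tgt rest := rfl

-- A's inner scan from index pre.length finds exactly the head of B's table restricted to the suffix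
theorem ffd_inner_eq (suf : List String) :
    ∀ (pre : List String),
      ffdInnerA (pre ++ suf) (PySem.List.pyRange (pre.length : Int) (((pre ++ suf).length : Int)) 1)
        = (((PySem.List.enumerate suf (pre.length : Int)).filter
            (fun p => PySem.Str.startswith (PySem.Str.strip p.2) "def ")).map Prod.fst).head? := by
  induction suf with
  | nil =>
    intro pre
    rw [PySem.List.pyRange_one_eq_nil (by simp)]
    rfl
  | cons l rest ih =>
    intro pre
    rw [PySem.List.pyRange_one_cons (by simp)]
    rw [ffdInnerA, ffd_pyGetD_append, PySem.List.enumerate_cons]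
    simp only [List.filter_cons]
    by_cases hd : PySem.Str.startswith (PySem.Str.strip l) "def " = true
    · rw [if_pos hd]
      simp only [hd]
      rw [if_pos trivial]
      rfl
    · rw [if_neg hd]
      simp only [hd]
      rw [if_neg (by simp : ¬ (false = true))]
      have h1 : pre ++ l :: rest = (pre ++ [l]) ++ rest := by simp
      have h2 : (pre.length : Int) + 1 = ((pre ++ [l]).length : Int) := by simp
      rw [h1, h2, ih (pre ++ [l])]

-- main invariant: A's outer loop on the enumerate-suffix equals B's loop on the filtered table of that suffix
theorem ffd_main (name : String) (suf : List String) :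
    ∀ (pre : List String),
      ffdOuterA (pre ++ suf) ("def " ++ name ++ "(") (PySem.List.enumerate suf (pre.length : Int))
        = ffdGoB (pre ++ suf) ("def " ++ name ++ "(")
            (((PySem.List.enumerate suf (pre.length : Int)).filter
              (fun p => PySem.Str.startswith (PySem.Str.strip p.2) "def ")).map Prod.fst) := by
  induction suf with
  | nil => intro pre; rfl
  | cons l rest ih =>
    intro pre
    rw [PySem.List.enumerate_cons]
    simp only [List.filter_cons]
    have h1 : pre ++ l :: rest = (pre ++ [l]) ++ rest := by simp
    have h2 : (pre.length : Int) + 1 = ((pre ++ [l]).length : Int) := by simp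
    by_cases ht : PySem.Str.startswith (PySem.Str.strip l) ("def " ++ name ++ "(") = true
    · have hd := ffd_tgt_isDef name l ht
      rw [ffdOuterA, if_pos ht]
      simp only [hd]
      rw [if_pos trivial, List.map_cons]
      have hfst : ((pre.length : Int), l).1 = (pre.length : Int) := rfl
      rw [hfst, ffdGoB_cons, ffd_pyGetD_append, if_pos ht]
      have hinner : ffdInnerA (pre ++ l :: rest)
          (PySem.List.pyRange ((pre.length : Int) + 1) (((pre ++ l :: rest).length : Int)) 1)
          = (((PySem.List.enumerate rest ((pre.length : Int) + 1)).filter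
              (fun p => PySem.Str.startswith (PySem.Str.strip p.2) "def ")).map Prod.fst).head? := by
        rw [h2, h1, ffd_inner_eq rest (pre ++ [l])]
      rw [hinner]
      cases (((PySem.List.enumerate rest ((pre.length : Int) + 1)).filter
          (fun p => PySem.Str.startswith (PySem.Str.strip p.2) "def ")).map Prod.fst) with
      | nil => rfl
      | cons k ks => rfl
    · rw [ffdOuterA, if_neg ht]
      by_cases hd : PySem.Str.startswith (PySem.Str.strip l) "def " = true
      · simp only [hd]
        rw [if_pos trivial, List.map_cons]
        have hfst : ((pre.length : Int), l).1 = (pre.length : Int) := rfl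
        rw [hfst, ffdGoB_cons, ffd_pyGetD_append, if_neg ht]
        rw [h1, h2, ih (pre ++ [l])]
      · simp only [hd]
        rw [if_neg (by simp : ¬ (false = true))]
        rw [h1, h2, ih (pre ++ [l])]

-- ===== VERDICT (by name: the statement is the Claim_ definition above) =====
theorem find_function_definitions_spec : Claim_equal_find_function_definitions := by
  intro content function_name _
  unfold Spec_find_function_definitions find_function_definitions find_function_definitions_alt
  have := ffd_main function_name ((PySem.Str.split? content "\n").getD []) []
  simpa using this
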